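-- pv_equiv track=rewrite | github.com/sarperavci/UAForge | scripts/fetch_opera_versions.py | organize_versions_by_major
-- ===== SOURCE A (Python) =====
-- from typing import Dict, List
--
-- def organize_versions_by_major(versions: List[str]) -> Dict[str, List[str]]:
--     """
--     Group versions by major version number.
--
--     Args:
--         versions: List of version strings
--
--     Returns:
--         Dictionary mapping major version to list of full versions
--     """
--     by_major = {}
--
--     for version in versions:
--         try:
--             major = version.split('.')[0]
--             if major not in by_major:
--                 by_major[major] = []
--             by_major[major].append(version)
--         except (ValueError, IndexError):
--             continue
--
--     return by_major
-- ===== SOURCE B (Python) =====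
-- def organize_versions_by_major(versions):
--     """Group versions by major version number (first dotted component).
--
--     Distinct-keys-then-filter: compute the majors in first-appearance order,
--     then build each group with a filter pass over the whole list.
--     """
--     majors = dict.fromkeys(v.split('.')[0] for v in versions)
--     return {m: [v for v in versions if v.split('.')[0] == m] for m in majors}
-- ===== Notes on version B (the rewrite author's own statement) =====
-- stated objective: idiomatic
-- what changed: Replaces the single accumulating dict pass (membership test, seed-with-[], append) with a two-phase distinct-keys-then-filter comprehension: dict.fromkeys gives the majors in first-seen order and a nested filter collects each group.
import Mathlib
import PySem

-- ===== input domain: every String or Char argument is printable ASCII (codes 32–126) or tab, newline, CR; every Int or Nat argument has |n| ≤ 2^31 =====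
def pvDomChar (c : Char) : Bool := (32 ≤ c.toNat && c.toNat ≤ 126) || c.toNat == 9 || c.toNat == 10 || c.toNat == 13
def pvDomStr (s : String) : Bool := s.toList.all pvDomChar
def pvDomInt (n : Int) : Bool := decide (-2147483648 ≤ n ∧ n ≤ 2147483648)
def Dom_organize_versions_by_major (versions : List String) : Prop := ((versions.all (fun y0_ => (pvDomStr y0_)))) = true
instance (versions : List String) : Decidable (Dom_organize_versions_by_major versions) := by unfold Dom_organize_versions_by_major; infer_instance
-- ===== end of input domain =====

-- B replaces A's single accumulating dict pass with a two-phase distinct-majors-then-filter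
-- comprehension (idiomatic dict.fromkeys); same return value, no speed claim.

-- shared helper: version.split('.')[0] (split with a non-empty separator never raises,
-- and its result is never empty, so the index 0 always succeeds)
def pvMajor (v : String) : String :=
  PySem.List.pyGetD ((PySem.Str.split? v ".").getD []) 0 ""

-- ===== PORT A =====
def organize_versions_by_major (versions : List String) : List (String × List String) :=
  (versions.foldl (fun by_major version =>
      let major := pvMajor version
      let by_major := if by_major.contains major then by_major else by_major.insert major []
      by_major.modify major [] (fun l => l ++ [version]))
    PySem.Dict.empty).items

-- ===== PORT B =====
def organize_versions_by_major_alt (versions : List String) : List (String × List String) :=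
  let majors := PySem.List.dedup (versions.map pvMajor)
  majors.map (fun m => (m, versions.filter (fun v => pvMajor v == m)))

-- ===== PRECONDITION & SPEC =====
def Spec_organize_versions_by_major (versions : List String) (out : List (String × List String)) : Prop := out = organize_versions_by_major_alt versions
instance (versions : List String) (out : List (String × List String)) : Decidable (Spec_organize_versions_by_major versions out) := by unfold Spec_organize_versions_by_major; infer_instance

-- ===== CLAIM (what is proved, stated in full; the proofs are below) =====
def Claim_equal_organize_versions_by_major : Prop := ∀ (versions : List String), Dom_organize_versions_by_major versions → Spec_organize_versions_by_major versions (organize_versions_by_major versions)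

-- ===== LEMMAS AND PROOFS =====

-- A's loop body (test membership, seed with [], append) is the modify-with-default step
theorem pvStepA_eq_modify (d : PySem.Dict String (List String)) (v : String) :
    (let major := pvMajor v
     let d' := if d.contains major then d else d.insert major []
     d'.modify major [] (fun l => l ++ [v]))
    = d.modify (pvMajor v) [] (fun l => l ++ [v]) := by
  by_cases h : d.contains (pvMajor v)
  · simp [h]
  · simp only [Bool.not_eq_true] at h
    simp only [h, Bool.false_eq_true, if_false, PySem.Dict.modify,
      PySem.Dict.getD_insert_self, PySem.Dict.insert_insert_self,
      PySem.Dict.getD_of_not_contains d _ h]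

-- the accumulated dict of the modify fold, itemised
theorem pvFold_items (versions : List String) :
    (versions.foldl (fun d v => d.modify (pvMajor v) [] (fun l => l ++ [v]))
      (PySem.Dict.empty : PySem.Dict String (List String))).items
    = (PySem.Set.ofList (versions.map pvMajor)).map
        (fun m => (m, versions.filter (fun v => pvMajor v == m))) := by
  set d := versions.foldl (fun d v => d.modify (pvMajor v) [] (fun l => l ++ [v]))
      (PySem.Dict.empty : PySem.Dict String (List String)) with hd
  have hkeys : d.keys = PySem.Set.ofList (versions.map pvMajor) := by
    rw [hd, PySem.Dict.keys_foldl_modify_key versions pvMajor [] (fun _ v l => l ++ [v])]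
    simp [PySem.Dict.keys_empty, PySem.Set.update_nil_left]
  have hnd : d.keys.Nodup := by
    rw [hd]
    exact PySem.Dict.nodup_keys_foldl_modify_key versions pvMajor [] (fun _ v l => l ++ [v]) _
      (by simp [PySem.Dict.keys_empty])
  rw [PySem.Dict.items_eq_map_keys d hnd [], hkeys]
  refine List.map_congr_left (fun m _ => ?_)
  have hget : d.getD m [] = versions.filter (fun v => pvMajor v == m) := by
    have := PySem.Dict.getD_foldl_modify_append
      (versions.map (fun v => (pvMajor v, v)))
      (PySem.Dict.empty : PySem.Dict String (List String)) m
    rw [List.foldl_map] at this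
    rw [hd]
    rw [List.filter_map] at this
    simp only [Function.comp_def, List.map_map] at this
    simpa using this
  rw [hget]

-- ===== VERDICT (by name: the statement is the Claim_ definition above) =====
theorem organize_versions_by_major_spec : Claim_equal_organize_versions_by_major := by
  intro versions _
  unfold Spec_organize_versions_by_major organize_versions_by_major organize_versions_by_major_alt
  have hcong : versions.foldl (fun by_major version =>
      let major := pvMajor version
      let by_major := if by_major.contains major then by_major else by_major.insert major []
      by_major.modify major [] (fun l => l ++ [version])) PySem.Dict.empty
    = versions.foldl (fun d v => d.modify (pvMajor v) [] (fun l => l ++ [v])) PySem.Dict.empty := by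
    exact congrFun (congrFun (congrArg List.foldl (funext fun d => funext fun v =>
      pvStepA_eq_modify d v)) PySem.Dict.empty) versions
  rw [hcong, pvFold_items, PySem.List.dedup_eq_ofList]
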